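-- pv_equiv track=rewrite | github.com/lmihaig/rockzip | tests/research_huffman.py | generate_CL_stream
-- ===== SOURCE A (Python) =====
-- def generate_CL_stream(combined_lengths):
--     """
--     Code Length Encoding
--     0-15: Represent code lengths of 0-15
--     16: Copy the previous code length 3-6 times.
--         (2 bits of length)
--         (0 = 3, ... , 3 = 6)
--     17: Repeat a code length of 0 for 3-10 times.
--         (3 bits of length)
--     18: Repeat a code length of 0 for 11-138 times
--         (7 bits of length)
--     """
--     CL_codes = []
--
--     prev_length = -1
--     count = 0
--
--     for length in combined_lengths + [-1]:  # Add sentinel at end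
--         if length == prev_length:
--             count += 1
--             if length != 0 and count >= 6:
--                 CL_codes.append(
--                     (16, min(count - 3, 3))
--                 )  # Repeat previous 3-6 times
--                 count -= min(count, 6)
--             elif length == 0 and count >= 138:
--                 CL_codes.append(
--                     (18, min(count - 11, 127))
--                 )  # Repeat zero 11-138 times
--                 count -= min(count, 138)
--         else:
--             # Output for previous length
--             if prev_length != -1:
--                 if prev_length == 0:
--                     if count <= 2:
--                         CL_codes.extend([(0, 0)] * count)  # Output zeros directly
--                     elif count <= 10:
--                         CL_codes.append((17, count - 3))  # Repeat zero 3-10 times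
--                     else:
--                         CL_codes.append(
--                             (18, count - 11)
--                         )  # Repeat zero 11-138 times
--                 else:
--                     CL_codes.extend(
--                         [(prev_length, 0)] * min(count, 2)
--                     )  # Output non-zero length directly
--                     if count > 2:
--                         CL_codes.append((16, count - 3))  # Repeat previous length
--
--             prev_length = length
--             count = 1
--     return CL_codes
-- ===== SOURCE B (Python) =====
-- from itertools import groupby
--
-- def generate_CL_stream(combined_lengths):
--     out = []
--     for value, grp in groupby(combined_lengths):
--         n = sum(1 for _ in grp)
--         if value == 0:
--             out.extend([(18, 127)] * (n // 138))
--             r = n % 138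
--             if r <= 2:
--                 out.extend([(0, 0)] * r)
--             elif r <= 10:
--                 out.append((17, r - 3))
--             else:
--                 out.append((18, r - 11))
--         else:
--             out.extend([(16, 3)] * (n // 6))
--             r = n % 6
--             if r <= 2:
--                 out.extend([(value, 0)] * r)
--             else:
--                 out.extend([(value, 0)] * 2)
--                 out.append((16, r - 3))
--     return out
-- ===== Notes on version B (the rewrite author's own statement) =====
-- stated objective: simpler
-- what changed: B groups the input into consecutive (value, run-length) runs with itertools.groupby and encodes each run by closed-form division/remainder arithmetic (n//6, n%6 resp. n//138, n%138), instead of A's single stateful pass with a -1 sentinel, a running counter and mid-run flush conditions.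
-- outside the precondition, e.g. on generate_CL_stream([-1]): A returns [], B returns [(-1, 0)]
import Mathlib
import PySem

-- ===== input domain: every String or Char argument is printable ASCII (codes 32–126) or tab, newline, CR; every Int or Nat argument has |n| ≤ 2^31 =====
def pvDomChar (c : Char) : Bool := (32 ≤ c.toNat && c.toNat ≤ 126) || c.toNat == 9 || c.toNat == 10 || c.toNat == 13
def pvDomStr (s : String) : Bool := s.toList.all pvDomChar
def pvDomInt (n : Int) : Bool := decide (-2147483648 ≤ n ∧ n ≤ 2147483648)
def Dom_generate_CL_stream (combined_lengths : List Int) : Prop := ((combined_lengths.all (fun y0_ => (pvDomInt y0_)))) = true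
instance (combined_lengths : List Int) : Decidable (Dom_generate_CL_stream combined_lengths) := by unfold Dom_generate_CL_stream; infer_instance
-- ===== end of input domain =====

-- B replaces A's sentinel-driven stateful pass by run-length grouping plus closed-form per-run arithmetic (objective: simpler).


-- ===== PORT A =====
-- one loop iteration of A: state = (CL_codes, prev_length, count)
def pvStepA (st : List (Int × Int) × Int × Int) (length : Int) : List (Int × Int) × Int × Int :=
  let CL := st.1
  let prev := st.2.1
  let count := st.2.2
  if length = prev then
    let count := count + 1
    if length ≠ 0 ∧ count ≥ 6 then
      (CL ++ [(16, min (count - 3) 3)], prev, count - min count 6)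
    else if length = 0 ∧ count ≥ 138 then
      (CL ++ [(18, min (count - 11) 127)], prev, count - min count 138)
    else (CL, prev, count)
  else
    let CL :=
      if prev ≠ -1 then
        if prev = 0 then
          if count ≤ 2 then CL ++ List.replicate count.toNat ((0 : Int), (0 : Int))
          else if count ≤ 10 then CL ++ [(17, count - 3)]
          else CL ++ [(18, count - 11)]
        else
          (CL ++ List.replicate (min count 2).toNat (prev, (0 : Int))) ++
            (if count > 2 then [((16 : Int), count - 3)] else [])
      else CL
    (CL, length, 1)

def generate_CL_stream (combined_lengths : List Int) : List (Int × Int) :=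
  ((combined_lengths ++ [-1]).foldl pvStepA ([], -1, 0)).1

-- ===== PORT B =====
def pvZeroTail (r : Nat) : List (Int × Int) :=
  if r ≤ 2 then List.replicate r ((0 : Int), (0 : Int))
  else if r ≤ 10 then [(17, (r : Int) - 3)]
  else [(18, (r : Int) - 11)]

def pvNzTail (v : Int) (r : Nat) : List (Int × Int) :=
  if r ≤ 2 then List.replicate r (v, (0 : Int))
  else List.replicate 2 (v, (0 : Int)) ++ [((16 : Int), (r : Int) - 3)]

def pvEncodeRun (v : Int) (n : Nat) : List (Int × Int) :=
  if v = 0 then List.replicate (n / 138) ((18 : Int), (127 : Int)) ++ pvZeroTail (n % 138)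
  else List.replicate (n / 6) ((16 : Int), (3 : Int)) ++ pvNzTail v (n % 6)

def generate_CL_stream_alt : List Int → List (Int × Int)
  | [] => []
  | v :: rest =>
    pvEncodeRun v (1 + (rest.takeWhile (· == v)).length) ++
      generate_CL_stream_alt (rest.dropWhile (· == v))
termination_by l => l.length
decreasing_by
  simpa using Nat.lt_succ_of_le (rest.dropWhile_sublist (p := (· == v))).length_le

-- ===== PRECONDITION & SPEC =====
-- Pre_ excludes lists containing -1 (not a code length): -1 in the input collides with A's
-- internal -1 sentinel / initial prev_length, so A silently swallows runs of -1.
def Pre_generate_CL_stream (combined_lengths : List Int) : Prop :=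
  (-1 : Int) ∉ combined_lengths
instance (combined_lengths : List Int) : Decidable (Pre_generate_CL_stream combined_lengths) := by
  unfold Pre_generate_CL_stream; infer_instance

def pvWitness_generate_CL_stream : List Int := [0, 0, 0, 0, 5, 5, 5, 5, 5, 5, 5, 2]

def Spec_generate_CL_stream (combined_lengths : List Int) (out : List (Int × Int)) : Prop :=
  out = generate_CL_stream_alt combined_lengths
instance (combined_lengths : List Int) (out : List (Int × Int)) : Decidable (Spec_generate_CL_stream combined_lengths out) := by unfold Spec_generate_CL_stream; infer_instance

-- ===== CLAIM (what is proved, stated in full; the proofs are below) =====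
def Claim_equal_generate_CL_stream : Prop := ∀ (combined_lengths : List Int), Dom_generate_CL_stream combined_lengths → Pre_generate_CL_stream combined_lengths → Spec_generate_CL_stream combined_lengths (generate_CL_stream combined_lengths)

lemma pvStepA_flush (acc : List (Int × Int)) (v c u : Int)
    (hne : u ≠ v) (hv : v ≠ -1) (hc : 0 ≤ c) :
    pvStepA (acc, v, c) u =
      (acc ++ (if v = 0 then pvZeroTail c.toNat else pvNzTail v c.toNat), u, 1) := by
  by_cases h0 : v = 0
  · subst h0
    simp only [pvStepA, pvZeroTail, if_neg hne, if_pos (by decide : (0:Int) ≠ -1)]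
    by_cases h2 : c ≤ 2
    · simp [h2, show c.toNat ≤ 2 by omega]
    · by_cases h10 : c ≤ 10
      · simp [h2, h10, show ¬ c.toNat ≤ 2 by omega, show c.toNat ≤ 10 by omega,
              Int.toNat_of_nonneg hc]
      · simp [h2, h10, show ¬ c.toNat ≤ 2 by omega, show ¬ c.toNat ≤ 10 by omega,
              Int.toNat_of_nonneg hc]
  · simp only [pvStepA, pvNzTail, if_neg hne, if_pos hv, if_neg h0]
    by_cases h2 : c ≤ 2
    · simp [show ¬ c > 2 by omega, show c.toNat ≤ 2 by omega, show min c 2 = c by omega]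
    · simp [show c > 2 by omega, show ¬ c.toNat ≤ 2 by omega, show min c 2 = 2 by omega,
            Int.toNat_of_nonneg hc]

lemma pvRunNz (v : Int) (hv : v ≠ 0) :
    ∀ (k : Nat) (acc : List (Int × Int)) (c : Int), 0 ≤ c → c < 6 →
      List.foldl pvStepA (acc, v, c) (List.replicate k v) =
        (acc ++ List.replicate ((c.toNat + k) / 6) ((16 : Int), (3 : Int)), v,
          (((c.toNat + k) % 6 : Nat) : Int)) := by
  intro k
  induction k with
  | zero =>
    intro acc c hc0 hc6
    simp [Nat.div_eq_of_lt (by omega : c.toNat < 6),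
          Nat.mod_eq_of_lt (by omega : c.toNat < 6), Int.toNat_of_nonneg hc0]
  | succ k ih =>
    intro acc c hc0 hc6
    have hstep : pvStepA (acc, v, c) v =
        if c = 5 then (acc ++ [((16 : Int), (3 : Int))], v, 0) else (acc, v, c + 1) := by
      by_cases h5 : c = 5
      · subst h5
        simp [pvStepA, hv]
      · have hlt : ¬ (c + 1 ≥ 6) := by omega
        simp [pvStepA, hv, hlt, h5]
    rw [List.replicate_succ, List.foldl_cons, hstep]
    by_cases h5 : c = 5
    · subst h5
      rw [if_pos rfl, ih _ 0 le_rfl (by omega)]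
      have h1 : (((5:Int).toNat + (k + 1)) / 6) = (0:Int).toNat + k / 6 + 1 := by omega
      have h2 : (((5:Int).toNat + (k + 1)) % 6) = ((0:Int).toNat + k) % 6 := by omega
      rw [h1, h2]
      simp [List.replicate_succ, List.append_assoc]
    · rw [if_neg h5, ih _ (c + 1) (by omega) (by omega)]
      have h1 : (c + 1).toNat + k = c.toNat + (k + 1) := by omega
      rw [h1]

lemma pvRunZero :
    ∀ (k : Nat) (acc : List (Int × Int)) (c : Int), 0 ≤ c → c < 138 →
      List.foldl pvStepA (acc, (0 : Int), c) (List.replicate k (0 : Int)) =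
        (acc ++ List.replicate ((c.toNat + k) / 138) ((18 : Int), (127 : Int)), (0 : Int),
          (((c.toNat + k) % 138 : Nat) : Int)) := by
  intro k
  induction k with
  | zero =>
    intro acc c hc0 hc6
    simp [Nat.div_eq_of_lt (by omega : c.toNat < 138),
          Nat.mod_eq_of_lt (by omega : c.toNat < 138), Int.toNat_of_nonneg hc0]
  | succ k ih =>
    intro acc c hc0 hc6
    have hstep : pvStepA (acc, (0 : Int), c) 0 =
        if c = 137 then (acc ++ [((18 : Int), (127 : Int))], (0 : Int), 0)
        else (acc, (0 : Int), c + 1) := by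
      by_cases h5 : c = 137
      · subst h5
        norm_num [pvStepA]
      · have hlt : ¬ (c + 1 ≥ 138) := by omega
        simp [pvStepA, hlt, h5]
    rw [List.replicate_succ, List.foldl_cons, hstep]
    by_cases h5 : c = 137
    · subst h5
      rw [if_pos rfl, ih _ 0 le_rfl (by omega)]
      have h1 : (((137:Int).toNat + (k + 1)) / 138) = (0:Int).toNat + k / 138 + 1 := by omega
      have h2 : (((137:Int).toNat + (k + 1)) % 138) = ((0:Int).toNat + k) % 138 := by omega
      rw [h1, h2]
      simp [List.replicate_succ, List.append_assoc]
    · rw [if_neg h5, ih _ (c + 1) (by omega) (by omega)]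
      have h1 : (c + 1).toNat + k = c.toNat + (k + 1) := by omega
      rw [h1]

-- processing a whole run of w (count entered at 1) and then one element u ≠ w
-- appends exactly B's per-run encoding.
lemma pvRunFlush (w : Int) (hw : w ≠ -1) (k : Nat) (acc : List (Int × Int)) (u : Int)
    (hne : u ≠ w) :
    pvStepA (List.foldl pvStepA (acc, w, 1) (List.replicate k w)) u =
      (acc ++ pvEncodeRun w (1 + k), u, 1) := by
  by_cases h0 : w = 0
  · subst h0
    rw [pvRunZero k acc 1 (by omega) (by omega),
        pvStepA_flush _ _ _ _ hne hw (Int.natCast_nonneg _)]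
    simp [pvEncodeRun, Int.toNat_one]
    congr 1
  · rw [pvRunNz w h0 k acc 1 (by omega) (by omega),
        pvStepA_flush _ _ _ _ hne hw (Int.natCast_nonneg _)]
    simp [pvEncodeRun, h0, Int.toNat_one]
    congr 1

lemma pvEnter : ∀ (n : Nat) (rest : List Int) (acc : List (Int × Int)) (w : Int),
    rest.length ≤ n → w ≠ -1 → (∀ x ∈ rest, x ≠ -1) →
    (List.foldl pvStepA (acc, w, 1) (rest ++ [-1])).1 =
      acc ++ generate_CL_stream_alt (w :: rest) := by
  intro n
  induction n with
  | zero =>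
    intro rest acc w hlen hw hall
    have hrest : rest = [] := List.eq_nil_of_length_eq_zero (by omega)
    subst hrest
    have h1 : ([] : List Int) ++ [-1] = List.replicate 0 w ++ [-1] := rfl
    rw [h1, show (List.replicate 0 w ++ [-1] : List Int) = List.replicate 0 w ++ [(-1)] from rfl]
    rw [List.foldl_append]
    have := pvRunFlush w hw 0 acc (-1) (fun h => hw h.symm)
    simp only [List.foldl_cons, List.foldl_nil] at *
    rw [this]
    simp [generate_CL_stream_alt]
  | succ n ih =>
    intro rest acc w hlen hw hall
    have hsplit : rest.takeWhile (· == w) ++ rest.dropWhile (· == w) = rest :=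
      List.takeWhile_append_dropWhile
    have hrepl : rest.takeWhile (· == w) =
        List.replicate (rest.takeWhile (· == w)).length w := by
      apply List.eq_replicate_of_mem
      intro b hb
      simpa using List.mem_takeWhile_imp hb
    have halt : generate_CL_stream_alt (w :: rest) =
        pvEncodeRun w (1 + (rest.takeWhile (· == w)).length) ++
          generate_CL_stream_alt (rest.dropWhile (· == w)) := by
      rw [generate_CL_stream_alt]
    have hfold : (rest ++ [-1] : List Int) =
        List.replicate (rest.takeWhile (· == w)).length w ++
          (rest.dropWhile (· == w) ++ [-1]) := by
      rw [← List.append_assoc, ← hrepl, hsplit]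
    rw [hfold, List.foldl_append]
    rcases hd : rest.dropWhile (· == w) with _ | ⟨u, rest2⟩
    · simp only [List.nil_append]
      have := pvRunFlush w hw (rest.takeWhile (· == w)).length acc (-1) (fun h => hw h.symm)
      simp only [List.foldl_cons, List.foldl_nil]
      rw [this, halt, hd]
      simp [generate_CL_stream_alt]
    · have hu_mem : u ∈ rest := (List.dropWhile_sublist (· == w)).mem (by rw [hd]; simp)
      have hu1 : u ≠ -1 := hall u hu_mem
      have huw : u ≠ w := by
        have hne : rest.dropWhile (· == w) ≠ [] := by rw [hd]; simp
        have h2 := List.head_dropWhile_not (· == w) hne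
        simp only [hd] at h2
        simpa using h2
      simp only [List.cons_append, List.foldl_cons]
      rw [pvRunFlush w hw _ acc u huw]
      have hlen2 : rest2.length ≤ n := by
        have hlr : rest.length =
            (rest.takeWhile (· == w)).length + (rest.dropWhile (· == w)).length := by
          conv_lhs => rw [← hsplit]
          simp only [List.length_append]
        rw [hd] at hlr; simp at hlr; omega
      have hall2 : ∀ x ∈ rest2, x ≠ -1 := by
        intro x hx
        exact hall x ((List.dropWhile_sublist (· == w)).mem (by rw [hd]; simp [hx]))
      rw [ih rest2 _ u hlen2 hu1 hall2, halt, hd, List.append_assoc]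

theorem generate_CL_stream_spec : Claim_equal_generate_CL_stream := by
  intro l _ hpre
  show generate_CL_stream l = generate_CL_stream_alt l
  cases l with
  | nil =>
    rw [generate_CL_stream_alt]
    rfl
  | cons w rest =>
    have hw : w ≠ -1 := by
      intro h
      exact hpre (by simp [h])
    have hall : ∀ x ∈ rest, x ≠ -1 := by
      intro x hx h
      subst h
      exact hpre (List.mem_cons_of_mem w hx)
    unfold generate_CL_stream
    rw [List.cons_append, List.foldl_cons]
    have hstep : pvStepA ([], -1, 0) w = ([], w, 1) := by
      simp [pvStepA, hw]
    rw [hstep, pvEnter rest.length rest [] w le_rfl hw hall]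
    simp
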